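-- pv_equiv track=rewrite | github.com/Riyanshi-Aditya/Data-Com-Assignment | project.py | B8ZS
-- ===== SOURCE A (Python) =====
-- def B8ZS(bits):
--     bits=list(bits)
--     i=0
--     while i<len(bits):
--         if bits[i:i+8]==["0","0","0","0","0","0","0","0"]:
--             bits[i:i+8]=["0","0","0","V","B","0","V","B"]
--             i=i+8
--         else:
--             i=i+1
--     return bits
-- ===== SOURCE B (Python) =====
-- def B8ZS(bits):
--     out = []
--     count = 0
--     for x in bits:
--         if x == "0":
--             count += 1
--             if count == 8:
--                 out.extend(["0", "0", "0", "V", "B", "0", "V", "B"])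
--                 count = 0
--         else:
--             out.extend(["0"] * count)
--             count = 0
--             out.append(x)
--     out.extend(["0"] * count)
--     return out
-- ===== Notes on version B (the rewrite author's own statement) =====
-- stated objective: faster
-- what changed: Replaces A's index loop that re-compares and splices 8-element slices of a mutable list with a single append-only pass maintaining a counter of pending consecutive '0' elements, emitting the substitution block when the counter reaches 8.
import Mathlib
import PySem

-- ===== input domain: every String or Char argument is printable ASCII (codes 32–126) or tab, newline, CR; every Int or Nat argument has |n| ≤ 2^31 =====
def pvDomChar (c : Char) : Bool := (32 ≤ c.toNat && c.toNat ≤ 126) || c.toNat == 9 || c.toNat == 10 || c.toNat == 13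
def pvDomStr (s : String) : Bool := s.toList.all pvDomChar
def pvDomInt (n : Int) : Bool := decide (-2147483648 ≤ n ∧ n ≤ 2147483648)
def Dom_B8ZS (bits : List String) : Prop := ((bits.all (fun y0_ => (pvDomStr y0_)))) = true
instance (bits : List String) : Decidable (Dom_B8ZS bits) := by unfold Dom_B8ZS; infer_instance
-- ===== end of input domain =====

-- B8ZS: B replaces A's index loop with in-place 8-slice compare/splice by a single
-- append-only pass keeping a counter of pending consecutive "0" elements (faster by a
-- constant factor; A copies list tails on every substitution).


-- ===== PORT A =====
-- A's `while i < len(bits)` loop: state is (i, bits); the slice test `bits[i:i+8] == ["0"]*8`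
-- and the splice `bits[i:i+8] = [...]` (same length, so len(bits) is invariant).
-- `fuel` makes the loop total; it is started at bits.length, which suffices since i grows.
def B8ZSgo : Nat → Nat → List String → List String
  | 0, _, bits => bits
  | fuel + 1, i, bits =>
      if i < bits.length then
        if PySem.List.slice bits (some (i : Int)) (some ((i : Int) + 8)) =
            ["0", "0", "0", "0", "0", "0", "0", "0"] then
          B8ZSgo fuel (i + 8)
            (bits.take i ++ ["0", "0", "0", "V", "B", "0", "V", "B"] ++ bits.drop (i + 8))
        else
          B8ZSgo fuel (i + 1) bits
      else bits

def B8ZS (bits : List String) : List String := B8ZSgo bits.length 0 bits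

-- ===== PORT B =====
-- one fold step of Source B's for-loop; state = (out, count)
def B8ZSstep (st : List String × Nat) (x : String) : List String × Nat :=
  if x = "0" then
    if st.2 + 1 = 8 then (st.1 ++ ["0", "0", "0", "V", "B", "0", "V", "B"], 0)
    else (st.1, st.2 + 1)
  else (st.1 ++ List.replicate st.2 "0" ++ [x], 0)

def B8ZS_alt (bits : List String) : List String :=
  let st := bits.foldl B8ZSstep ([], 0)
  st.1 ++ List.replicate st.2 "0"

-- ===== PRECONDITION & SPEC =====
def Spec_B8ZS (bits : List String) (out : List String) : Prop := out = B8ZS_alt bits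
instance (bits : List String) (out : List String) : Decidable (Spec_B8ZS bits out) := by unfold Spec_B8ZS; infer_instance

-- ===== CLAIM (what is proved, stated in full; the proofs are below) =====
def Claim_equal_B8ZS : Prop := ∀ (bits : List String), Dom_B8ZS bits → Spec_B8ZS bits (B8ZS bits)

-- ===== LEMMAS AND PROOFS =====

-- canonical greedy substitution function both ports are reduced to
def B8ZSf : List String → List String
  | [] => []
  | x :: xs =>
    if _h : (x :: xs).take 8 = ["0", "0", "0", "0", "0", "0", "0", "0"] then
      ["0", "0", "0", "V", "B", "0", "V", "B"] ++ B8ZSf ((x :: xs).drop 8)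
    else
      x :: B8ZSf xs
termination_by l => l.length
decreasing_by
  · simp
  · simp

theorem B8ZSf_cons_take8 (x : String) (xs : List String)
    (h : (x :: xs).take 8 = ["0", "0", "0", "0", "0", "0", "0", "0"]) :
    B8ZSf (x :: xs) = ["0", "0", "0", "V", "B", "0", "V", "B"] ++ B8ZSf ((x :: xs).drop 8) := by
  rw [B8ZSf, dif_pos h]

theorem B8ZSf_cons_ne (x : String) (xs : List String)
    (h : (x :: xs).take 8 ≠ ["0", "0", "0", "0", "0", "0", "0", "0"]) :
    B8ZSf (x :: xs) = x :: B8ZSf xs := by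
  rw [B8ZSf, dif_neg h]

theorem not_take8_rep_cons (c : Nat) (hc : c < 8) (x : String) (l : List String)
    (hx : x ≠ "0") :
    (List.replicate c "0" ++ x :: l).take 8 ≠ ["0", "0", "0", "0", "0", "0", "0", "0"] := by
  interval_cases c <;> · intro h; simp [List.take_succ_cons] at h; simp_all

theorem B8ZSf_rep (c : Nat) (hc : c < 8) :
    B8ZSf (List.replicate c "0") = List.replicate c "0" := by
  induction c with
  | zero => simp [B8ZSf]
  | succ k ih =>
    rw [List.replicate_succ, B8ZSf_cons_ne, ← List.replicate_succ]
    · rw [ih (by omega), List.replicate_succ]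
    · intro h
      have := congrArg List.length h
      simp [← List.replicate_succ] at this
      omega

theorem B8ZSf_rep_cons_ne (c : Nat) (hc : c < 8) (x : String) (l : List String)
    (hx : x ≠ "0") :
    B8ZSf (List.replicate c "0" ++ x :: l) =
      List.replicate c "0" ++ x :: B8ZSf l := by
  induction c with
  | zero => simpa using B8ZSf_cons_ne x l (by simpa using not_take8_rep_cons 0 (by omega) x l hx)
  | succ k ih =>
    have hne := not_take8_rep_cons (k + 1) hc x l hx
    rw [List.replicate_succ, List.cons_append] at hne ⊢
    rw [B8ZSf_cons_ne _ _ hne, ih (by omega)]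
    simp

theorem B8ZSf_rep8 (l : List String) :
    B8ZSf (List.replicate 8 "0" ++ l) =
      ["0", "0", "0", "V", "B", "0", "V", "B"] ++ B8ZSf l := by
  have h : ((("0":String) :: (List.replicate 7 "0" ++ l)).take 8) =
      ["0", "0", "0", "0", "0", "0", "0", "0"] := by
    simp [List.take_succ_cons]
  have : List.replicate 8 "0" ++ l = "0" :: (List.replicate 7 "0" ++ l) := by
    simp [List.replicate_succ]
  rw [this, B8ZSf_cons_take8 _ _ h]
  simp

-- ===== A-side: the while loop computes take i ++ B8ZSf (drop i) =====
theorem B8ZSgo_eq (fuel : Nat) :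
    ∀ (i : Nat) (bits : List String), bits.length - i ≤ fuel →
      B8ZSgo fuel i bits = bits.take i ++ B8ZSf (bits.drop i) := by
  induction fuel with
  | zero =>
    intro i bits h
    have hi : bits.length ≤ i := by omega
    simp [B8ZSgo, List.take_of_length_le hi, List.drop_of_length_le hi, B8ZSf]
  | succ n ih =>
    intro i bits h
    rw [B8ZSgo]
    by_cases hi : i < bits.length
    · simp only [hi, if_true]
      rw [show ((i : Int) + 8) = ((i : Int) + ((8 : Nat) : Int)) by norm_cast,
        PySem.List.slice_natCast_add]
      by_cases hs : (bits.drop i).take 8 = ["0", "0", "0", "0", "0", "0", "0", "0"]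
      · simp only [hs, if_true]
        set bits' := bits.take i ++ ["0", "0", "0", "V", "B", "0", "V", "B"] ++ bits.drop (i + 8) with hb
        have h8 : i + 8 ≤ bits.length := by
          have := congrArg List.length hs
          simp at this
          omega
        have hti : (bits.take i).length = i := by simp; omega
        have hlen' : bits'.length = bits.length := by
          simp [hb]; omega
        rw [ih (i + 8) bits' (by omega)]
        have htake : bits'.take (i + 8) =
            bits.take i ++ ["0", "0", "0", "V", "B", "0", "V", "B"] :=
          List.take_left' (by simp [hti])
        have hdrop : bits'.drop (i + 8) = bits.drop (i + 8) :=
          List.drop_left' (by simp [hti])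
        rw [htake, hdrop]
        have hsplit : bits.drop i = List.replicate 8 "0" ++ bits.drop (i + 8) := by
          conv_lhs => rw [← List.take_append_drop 8 (bits.drop i)]
          rw [hs, List.drop_drop]
          rfl
        rw [hsplit, B8ZSf_rep8]
        simp
      · simp only [hs, if_false]
        rw [ih (i + 1) bits (by omega)]
        obtain ⟨x, xs, hd⟩ : ∃ x xs, bits.drop i = x :: xs := by
          cases hd : bits.drop i with
          | nil => exact absurd (by simpa using congrArg List.length hd) (by omega)
          | cons x xs => exact ⟨x, xs, rfl⟩
        have htail : bits.drop (i + 1) = xs := by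
          have h1 : bits.drop (i + 1) = List.drop 1 (bits.drop i) := by
            rw [List.drop_drop, Nat.add_comm]
          rw [h1, hd, List.drop_one, List.tail_cons]
        have hgx : bits[i]? = some x := by
          have h2 : (bits.drop i)[0]? = bits[i + 0]? := List.getElem?_drop ..
          simpa [hd] using h2.symm
        have htk : bits.take (i + 1) = bits.take i ++ [x] := by
          rw [List.take_add_one, hgx]
          rfl
        rw [hd] at hs
        rw [hd, B8ZSf_cons_ne x xs hs, htail, htk]
        simp
    · simp only [hi, if_false]
      have hge : bits.length ≤ i := by omega
      simp [List.take_of_length_le hge, List.drop_of_length_le hge, B8ZSf]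

-- ===== B-side =====
theorem B8ZS_fold_eq (l : List String) :
    ∀ (acc : List String) (c : Nat), c < 8 →
      (l.foldl B8ZSstep (acc, c)).1 ++ List.replicate (l.foldl B8ZSstep (acc, c)).2 "0" =
        acc ++ B8ZSf (List.replicate c "0" ++ l) := by
  induction l with
  | nil =>
    intro acc c hc
    simp [B8ZSf_rep c hc]
  | cons x xs ih =>
    intro acc c hc
    by_cases hx : x = "0"
    · subst hx
      by_cases h8 : c + 1 = 8
      · have hrw : List.replicate c "0" ++ "0" :: xs = List.replicate 8 "0" ++ xs := by
          rw [← h8]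
          simp [List.replicate_succ']
        rw [hrw, B8ZSf_rep8]
        simp only [List.foldl_cons, B8ZSstep, if_pos h8, if_true]
        rw [ih _ 0 (by omega)]
        simp
      · have hrw : List.replicate c "0" ++ "0" :: xs = List.replicate (c + 1) "0" ++ xs := by
          simp [List.replicate_succ']
        rw [hrw]
        simp only [List.foldl_cons, B8ZSstep, if_neg h8, if_true]
        exact ih _ (c + 1) (by omega)
    · rw [B8ZSf_rep_cons_ne c hc x xs hx]
      simp only [List.foldl_cons, B8ZSstep, if_neg hx]
      rw [ih _ 0 (by omega)]
      simp

-- ===== VERDICT (by name: the statement is the Claim_ definition above) =====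
theorem B8ZS_spec : Claim_equal_B8ZS := by
  intro bits _
  unfold Spec_B8ZS B8ZS B8ZS_alt
  rw [B8ZSgo_eq bits.length 0 bits (by omega)]
  have := B8ZS_fold_eq bits [] 0 (by omega)
  simp at this ⊢
  rw [this]
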